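-- pv_equiv track=rewrite | github.com/alexej-schelle/DSADP0125 | Uebung-4/aufgabe_4_5.py | DecryptString
-- ===== SOURCE A (Python) =====
-- def DecryptString(encryptedString, key, charset):
--     decryptedString = ""
--     for char in encryptedString:
--         if char in charset:
--             oldIndex = charset.index(char)
--             newIndex = (oldIndex - key) % 26
--             decryptedString += charset[newIndex]
--         else:
--             decryptedString += char
--     return decryptedString
-- ===== SOURCE B (Python) =====
-- def DecryptString(encryptedString, key, charset):
--     table = {}
--     for c in dict.fromkeys(encryptedString):
--         if c in charset:
--             table[c] = charset[(charset.index(c) - key) % 26]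
--     return "".join(table.get(c, c) for c in encryptedString)
-- ===== Notes on version B (the rewrite author's own statement) =====
-- stated objective: alternative
-- what changed: B precomputes a substitution table once over the distinct characters of the input (dict.fromkeys + one charset.index per distinct char) and then emits the result in a single join pass of O(1) dict lookups, replacing A's per-character membership test, linear charset.index scan and string concatenation.
import Mathlib
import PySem

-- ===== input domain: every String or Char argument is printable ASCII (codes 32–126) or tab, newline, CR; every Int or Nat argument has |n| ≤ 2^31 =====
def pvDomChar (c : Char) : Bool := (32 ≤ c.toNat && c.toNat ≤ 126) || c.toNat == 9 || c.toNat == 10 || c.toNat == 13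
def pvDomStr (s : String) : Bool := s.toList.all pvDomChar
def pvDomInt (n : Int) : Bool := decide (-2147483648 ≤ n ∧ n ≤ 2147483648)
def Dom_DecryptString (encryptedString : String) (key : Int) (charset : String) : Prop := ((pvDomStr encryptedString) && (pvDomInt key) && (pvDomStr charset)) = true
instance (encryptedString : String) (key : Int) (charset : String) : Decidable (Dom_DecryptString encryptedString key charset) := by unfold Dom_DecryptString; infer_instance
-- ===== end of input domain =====

-- B precomputes a substitution table over the distinct input characters, then translates in one pass (a table-based alternative to A's per-character charset scan).


-- ===== PORT A =====
-- 'char in charset' / 'charset.index(char)' for a single char are ported as list membership / List.idxOf (exact);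
-- 'charset[newIndex]' is PySem.List.pyGetD (the IndexError inputs are excluded by Pre_).
def DecryptString (encryptedString : String) (key : Int) (charset : String) : String :=
  String.ofList (encryptedString.toList.foldl (fun acc c =>
    if c ∈ charset.toList then
      acc ++ [PySem.List.pyGetD charset.toList
        (PySem.Int.mod ((charset.toList.idxOf c : Int) - key) 26) c]
    else acc ++ [c]) [])

-- ===== PORT B =====
-- dict.fromkeys(encryptedString) is PySem.List.dedup; the table is a PySem.Dict; join of table.get(c, c).
def DecryptString_alt (encryptedString : String) (key : Int) (charset : String) : String :=
  let table : PySem.Dict Char Char :=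
    (PySem.List.dedup encryptedString.toList).foldl (fun d c =>
      if c ∈ charset.toList then
        d.insert c (PySem.List.pyGetD charset.toList
          (PySem.Int.mod ((charset.toList.idxOf c : Int) - key) 26) c)
      else d) PySem.Dict.empty
  String.ofList (encryptedString.toList.map (fun c => table.getD c c))

-- ===== PRECONDITION & SPEC =====
-- Pre_ excludes exactly the inputs where Python's A raises IndexError: some character of the
-- input that occurs in charset has (charset.index(c) - key) % 26 ≥ len(charset).  (B raises there too.)
def Pre_DecryptString (encryptedString : String) (key : Int) (charset : String) : Prop :=
  (encryptedString.toList.all (fun c => !(charset.toList.contains c)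
    || decide (PySem.Int.mod ((charset.toList.idxOf c : Int) - key) 26 < (charset.toList.length : Int)))) = true
instance (encryptedString : String) (key : Int) (charset : String) : Decidable (Pre_DecryptString encryptedString key charset) := by unfold Pre_DecryptString; infer_instance
def pvWitness_DecryptString : String × Int × String := ("aa!", 26, "ab")

def Spec_DecryptString (encryptedString : String) (key : Int) (charset : String) (out : String) : Prop := out = DecryptString_alt encryptedString key charset
instance (encryptedString : String) (key : Int) (charset : String) (out : String) : Decidable (Spec_DecryptString encryptedString key charset out) := by unfold Spec_DecryptString; infer_instance

-- ===== CLAIM (what is proved, stated in full; the proofs are below) =====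
def Claim_equal_DecryptString : Prop := ∀ (encryptedString : String) (key : Int) (charset : String), Dom_DecryptString encryptedString key charset → Pre_DecryptString encryptedString key charset → Spec_DecryptString encryptedString key charset (DecryptString encryptedString key charset)

-- ===== LEMMAS AND PROOFS =====

-- the per-character target value both programs compute
def pvTgt (key : Int) (charset : String) (c : Char) : Char :=
  if c ∈ charset.toList then
    PySem.List.pyGetD charset.toList (PySem.Int.mod ((charset.toList.idxOf c : Int) - key) 26) c
  else c

theorem pvA_eq_map (encryptedString : String) (key : Int) (charset : String) :
    DecryptString encryptedString key charset
      = String.ofList (encryptedString.toList.map (pvTgt key charset)) := by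
  unfold DecryptString
  congr 1
  rw [show (fun (acc : List Char) (c : Char) =>
      if c ∈ charset.toList then
        acc ++ [PySem.List.pyGetD charset.toList
          (PySem.Int.mod ((charset.toList.idxOf c : Int) - key) 26) c]
      else acc ++ [c]) = (fun acc c => acc ++ [pvTgt key charset c]) from by
    funext acc c; unfold pvTgt; split <;> rfl]
  simpa using PySem.List.foldl_append_singleton_eq_map (pvTgt key charset) encryptedString.toList []

theorem pvTable_getD (key : Int) (charset : String) (l : List Char) (d : PySem.Dict Char Char) (c : Char) :
    (l.foldl (fun d c =>
      if c ∈ charset.toList then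
        d.insert c (PySem.List.pyGetD charset.toList
          (PySem.Int.mod ((charset.toList.idxOf c : Int) - key) 26) c)
      else d) d).getD c c
    = if c ∈ l ∧ c ∈ charset.toList then pvTgt key charset c else d.getD c c := by
  induction l generalizing d with
  | nil => simp
  | cons x l ih =>
    simp only [List.foldl_cons, ih]
    by_cases hcl : c ∈ l ∧ c ∈ charset.toList
    · simp [hcl, List.mem_cons]
    · by_cases hcx : c = x
      · subst hcx
        by_cases hcs : c ∈ charset.toList
        · simp [hcs, pvTgt, PySem.Dict.getD_insert_self]
        · simp [hcs]
      · have hne : ¬ (c ∈ x :: l ∧ c ∈ charset.toList) := by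
          intro ⟨h1, h2⟩
          rcases List.mem_cons.mp h1 with h | h
          · exact hcx h
          · exact hcl ⟨h, h2⟩
        rw [if_neg hcl, if_neg hne]
        split
        · simp [PySem.Dict.getD_insert, hcx]
        · rfl

-- ===== VERDICT (by name: the statement is the Claim_ definition above) =====
theorem DecryptString_spec : Claim_equal_DecryptString := by
  intro encryptedString key charset _ _
  unfold Spec_DecryptString DecryptString_alt
  rw [pvA_eq_map]
  congr 1
  apply List.map_congr_left
  intro c hc
  rw [pvTable_getD]
  by_cases hcs : c ∈ charset.toList
  · rw [if_pos ⟨(PySem.List.mem_dedup _ c).mpr hc, hcs⟩]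
  · rw [if_neg (fun h => hcs h.2)]
    simp [pvTgt, hcs, PySem.Dict.getD_empty]
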